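-- pv_equiv track=rewrite | github.com/kareem-2shraf/Championship-to-Race_SimulationEngine | 0savepoint/r4.py | calculate_podium_finishes
-- ===== SOURCE A (Python) =====
-- HISTORICAL_PODIUMS = {
--     1: ["NORRIS", "VERSTAPPEN", "RUSSELL"], 2: ["PIASTRI", "NORRIS", "RUSSELL"],
--     3: ["VERSTAPPEN", "NORRIS", "PIASTRI"], 4: ["PIASTRI", "NORRIS", "RUSSELL"],
--     5: ["PIASTRI", "VERSTAPPEN", "LECLERC"], 6: ["PIASTRI", "NORRIS", "RUSSELL"],
--     7: ["VERSTAPPEN", "NORRIS", "PIASTRI"], 8: ["NORRIS", "LECLERC", "PIASTRI"],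
--     9: ["PIASTRI", "NORRIS", "LECLERC"], 10: ["RUSSELL", "VERSTAPPEN", "ANTONELLI"],
--     11: ["NORRIS", "PIASTRI", "LECLERC"], 12: ["NORRIS", "PIASTRI", "HULKENBERG"],
--     13: ["PIASTRI", "NORRIS", "LECLERC"], 14: ["NORRIS", "PIASTRI", "RUSSELL"],
--     15: ["PIASTRI", "VERSTAPPEN", "HADJAR"], 16: ["VERSTAPPEN", "NORRIS", "PIASTRI"],
--     17: ["VERSTAPPEN", "RUSSELL", "SAINZ"], 18: ["RUSSELL", "VERSTAPPEN", "NORRIS"],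
--     19: ["VERSTAPPEN", "NORRIS", "LECLERC"], 20: ["NORRIS", "LECLERC", "VERSTAPPEN"],
--     21: ["NORRIS", "ANTONELLI", "VERSTAPPEN"], 22: ["VERSTAPPEN", "RUSSELL", "ANTONELLI"],
--     23: ["VERSTAPPEN", "PIASTRI", "SAINZ"], 24: ["VERSTAPPEN", "PIASTRI", "NORRIS"]
-- }
--
-- def calculate_podium_finishes(driver_surname, current_round):
--     """Calculate number of 1st, 2nd, 3rd finishes for a driver"""
--     first = second = third = 0
--     for round_num in range(1, min(current_round + 1, 25)):
--         if round_num in HISTORICAL_PODIUMS: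
--             podium = HISTORICAL_PODIUMS[round_num]
--             if len(podium) > 0 and podium[0] == driver_surname:
--                 first += 1
--             if len(podium) > 1 and podium[1] == driver_surname:
--                 second += 1
--             if len(podium) > 2 and podium[2] == driver_surname:
--                 third += 1
--     return first, second, third
-- ===== SOURCE B (Python) =====
-- HISTORICAL_PODIUMS = {
--     1: ["NORRIS", "VERSTAPPEN", "RUSSELL"], 2: ["PIASTRI", "NORRIS", "RUSSELL"],
--     3: ["VERSTAPPEN", "NORRIS", "PIASTRI"], 4: ["PIASTRI", "NORRIS", "RUSSELL"],
--     5: ["PIASTRI", "VERSTAPPEN", "LECLERC"], 6: ["PIASTRI", "NORRIS", "RUSSELL"],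
--     7: ["VERSTAPPEN", "NORRIS", "PIASTRI"], 8: ["NORRIS", "LECLERC", "PIASTRI"],
--     9: ["PIASTRI", "NORRIS", "LECLERC"], 10: ["RUSSELL", "VERSTAPPEN", "ANTONELLI"],
--     11: ["NORRIS", "PIASTRI", "LECLERC"], 12: ["NORRIS", "PIASTRI", "HULKENBERG"],
--     13: ["PIASTRI", "NORRIS", "LECLERC"], 14: ["NORRIS", "PIASTRI", "RUSSELL"],
--     15: ["PIASTRI", "VERSTAPPEN", "HADJAR"], 16: ["VERSTAPPEN", "NORRIS", "PIASTRI"],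
--     17: ["VERSTAPPEN", "RUSSELL", "SAINZ"], 18: ["RUSSELL", "VERSTAPPEN", "NORRIS"],
--     19: ["VERSTAPPEN", "NORRIS", "LECLERC"], 20: ["NORRIS", "LECLERC", "VERSTAPPEN"],
--     21: ["NORRIS", "ANTONELLI", "VERSTAPPEN"], 22: ["VERSTAPPEN", "RUSSELL", "ANTONELLI"],
--     23: ["VERSTAPPEN", "PIASTRI", "SAINZ"], 24: ["VERSTAPPEN", "PIASTRI", "NORRIS"]
-- }
--
--
-- def _build_index():
--     """Invert the history once: surname -> (rounds won, rounds 2nd, rounds 3rd), ascending."""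
--     index = {}
--     for rnd, podium in HISTORICAL_PODIUMS.items():
--         for pos, name in enumerate(podium):
--             index.setdefault(name, ([], [], []))[pos].append(rnd)
--     return index
--
--
-- _PODIUM_INDEX = _build_index()
--
--
-- def calculate_podium_finishes(driver_surname, current_round):
--     """Look the driver up in the precomputed inverted index and count, per
--     position, how many of the driver's podium rounds fall within the window
--     (each round list is ascending, so stop at the first round past the cutoff)."""
--     cutoff = min(current_round, 24)
--     firsts, seconds, thirds = _PODIUM_INDEX.get(driver_surname, ((), (), ()))
--
--     def count_upto(rounds):
--         n = 0
--         for r in rounds: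
--             if r > cutoff:
--                 break
--             n += 1
--         return n
--
--     return count_upto(firsts), count_upto(seconds), count_upto(thirds)
-- ===== Notes on version B (the rewrite author's own statement) =====
-- stated objective: alternative
-- what changed: A scans every round of the window testing all three podium slots against the driver; B precomputes once an inverted index mapping each surname to its ascending lists of rounds per podium position, then answers a query by looking the driver up and counting, with an early exit, the rounds not past min(current_round, 24).
import Mathlib
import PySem

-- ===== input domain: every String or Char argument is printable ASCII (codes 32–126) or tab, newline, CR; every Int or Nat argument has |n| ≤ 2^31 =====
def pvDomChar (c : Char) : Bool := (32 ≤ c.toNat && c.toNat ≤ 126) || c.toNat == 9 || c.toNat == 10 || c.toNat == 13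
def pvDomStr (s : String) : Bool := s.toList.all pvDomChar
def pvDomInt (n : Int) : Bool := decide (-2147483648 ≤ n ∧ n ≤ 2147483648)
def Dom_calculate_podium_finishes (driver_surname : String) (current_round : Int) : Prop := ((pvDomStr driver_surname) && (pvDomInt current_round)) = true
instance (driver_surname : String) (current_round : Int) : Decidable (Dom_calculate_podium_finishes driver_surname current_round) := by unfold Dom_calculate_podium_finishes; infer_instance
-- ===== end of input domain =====

-- B replaces A's per-round scan by a precomputed inverted index (surname -> ascending round lists per
-- podium position) queried with an early-exit count of rounds within the window (objective: alternative).


-- shared module constant HISTORICAL_PODIUMS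
def HISTORICAL_PODIUMS : PySem.Dict Int (List String) := PySem.Dict.ofList [
  (1, ["NORRIS", "VERSTAPPEN", "RUSSELL"]), (2, ["PIASTRI", "NORRIS", "RUSSELL"]),
  (3, ["VERSTAPPEN", "NORRIS", "PIASTRI"]), (4, ["PIASTRI", "NORRIS", "RUSSELL"]),
  (5, ["PIASTRI", "VERSTAPPEN", "LECLERC"]), (6, ["PIASTRI", "NORRIS", "RUSSELL"]),
  (7, ["VERSTAPPEN", "NORRIS", "PIASTRI"]), (8, ["NORRIS", "LECLERC", "PIASTRI"]),
  (9, ["PIASTRI", "NORRIS", "LECLERC"]), (10, ["RUSSELL", "VERSTAPPEN", "ANTONELLI"]),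
  (11, ["NORRIS", "PIASTRI", "LECLERC"]), (12, ["NORRIS", "PIASTRI", "HULKENBERG"]),
  (13, ["PIASTRI", "NORRIS", "LECLERC"]), (14, ["NORRIS", "PIASTRI", "RUSSELL"]),
  (15, ["PIASTRI", "VERSTAPPEN", "HADJAR"]), (16, ["VERSTAPPEN", "NORRIS", "PIASTRI"]),
  (17, ["VERSTAPPEN", "RUSSELL", "SAINZ"]), (18, ["RUSSELL", "VERSTAPPEN", "NORRIS"]),
  (19, ["VERSTAPPEN", "NORRIS", "LECLERC"]), (20, ["NORRIS", "LECLERC", "VERSTAPPEN"]),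
  (21, ["NORRIS", "ANTONELLI", "VERSTAPPEN"]), (22, ["VERSTAPPEN", "RUSSELL", "ANTONELLI"]),
  (23, ["VERSTAPPEN", "PIASTRI", "SAINZ"]), (24, ["VERSTAPPEN", "PIASTRI", "NORRIS"])]

-- ===== PORT A =====
-- loop body of A: membership test, then the three length-guarded slot checks.
-- (HISTORICAL_PODIUMS[round_num] is ported as getD under the contains guard, where the lookup is exact.)
def pvStepA (driver_surname : String) (st : Int × Int × Int) (round_num : Int) : Int × Int × Int :=
  if HISTORICAL_PODIUMS.contains round_num then
    let podium := HISTORICAL_PODIUMS.getD round_num []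
    let first := if 0 < podium.length ∧ PySem.List.pyGet? podium 0 = some driver_surname then st.1 + 1 else st.1
    let second := if 1 < podium.length ∧ PySem.List.pyGet? podium 1 = some driver_surname then st.2.1 + 1 else st.2.1
    let third := if 2 < podium.length ∧ PySem.List.pyGet? podium 2 = some driver_surname then st.2.2 + 1 else st.2.2
    (first, second, third)
  else st

def calculate_podium_finishes (driver_surname : String) (current_round : Int) : Int × Int × Int :=
  (PySem.List.pyRange 1 (min (current_round + 1) 25) 1).foldl (pvStepA driver_surname) (0, 0, 0)

-- ===== PORT B =====
-- `index.setdefault(name, ([], [], []))[pos].append(rnd)` = modify name's triple, appending rnd at slot pos.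
def pvAppendAt (t : List Int × List Int × List Int) (pos : Int) (rnd : Int) : List Int × List Int × List Int :=
  if pos = 0 then (t.1 ++ [rnd], t.2.1, t.2.2)
  else if pos = 1 then (t.1, t.2.1 ++ [rnd], t.2.2)
  else (t.1, t.2.1, t.2.2 ++ [rnd])

-- _build_index(): invert the history once, surname -> per-position round lists
def pvPodiumIndex : PySem.Dict String (List Int × List Int × List Int) :=
  HISTORICAL_PODIUMS.items.foldl (fun index rp =>
    (PySem.List.enumerate rp.2 0).foldl
      (fun index pn => index.modify pn.2 ([], [], []) (fun t => pvAppendAt t pn.1 rp.1)) index)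
    PySem.Dict.empty

-- count_upto: count leading rounds ≤ cutoff, stopping at the first one past it
def pvCountUpto (rounds : List Int) (cutoff : Int) : Int :=
  match rounds with
  | [] => 0
  | r :: rs => if r > cutoff then 0 else pvCountUpto rs cutoff + 1

def calculate_podium_finishes_alt (driver_surname : String) (current_round : Int) : Int × Int × Int :=
  let cutoff := min current_round 24
  let t := pvPodiumIndex.getD driver_surname ([], [], [])
  (pvCountUpto t.1 cutoff, pvCountUpto t.2.1 cutoff, pvCountUpto t.2.2 cutoff)

-- ===== PRECONDITION & SPEC =====
def Spec_calculate_podium_finishes (driver_surname : String) (current_round : Int) (out : Int × Int × Int) : Prop := out = calculate_podium_finishes_alt driver_surname current_round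
instance (driver_surname : String) (current_round : Int) (out : Int × Int × Int) : Decidable (Spec_calculate_podium_finishes driver_surname current_round out) := by unfold Spec_calculate_podium_finishes; infer_instance

-- ===== CLAIM (what is proved, stated in full; the proofs are below) =====
def Claim_equal_calculate_podium_finishes : Prop := ∀ (driver_surname : String) (current_round : Int), Dom_calculate_podium_finishes driver_surname current_round → Spec_calculate_podium_finishes driver_surname current_round (calculate_podium_finishes driver_surname current_round)

-- ===== LEMMAS AND PROOFS =====

-- the slot-p column predicate of A's guard, as a Bool on the round number
def pvMatch (p : Int) (d : String) (r : Int) : Bool :=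
  PySem.List.pyGetD (HISTORICAL_PODIUMS.getD r []) p "" == d

def pvNAMES : List String :=
  ["NORRIS", "VERSTAPPEN", "RUSSELL", "PIASTRI", "LECLERC", "ANTONELLI", "HULKENBERG", "HADJAR", "SAINZ"]

-- every round A's window can select is a key of HISTORICAL_PODIUMS with a length-3 row
lemma podium_key (r : Int) (h1 : 1 ≤ r) (h2 : r ≤ 24) :
    HISTORICAL_PODIUMS.contains r = true ∧ (HISTORICAL_PODIUMS.getD r []).length = 3 := by
  interval_cases r <;> exact ⟨by decide, by decide⟩

-- A's three-counter fold over a list of valid rounds counts the per-column matches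
lemma fold_eq_filters (d : String) (rs : List Int)
    (h : ∀ r ∈ rs, HISTORICAL_PODIUMS.contains r = true ∧ (HISTORICAL_PODIUMS.getD r []).length = 3) :
    ∀ f s t : Int, rs.foldl (pvStepA d) (f, s, t) =
      (f + ((rs.filter (pvMatch 0 d)).length : Int),
       s + ((rs.filter (pvMatch 1 d)).length : Int),
       t + ((rs.filter (pvMatch 2 d)).length : Int)) := by
  induction rs with
  | nil => intro f s t; simp
  | cons r rs ih =>
    intro f s t
    obtain ⟨hc, hlen⟩ := h r (List.mem_cons_self)
    obtain ⟨a, b, c, hp⟩ := List.length_eq_three.mp hlen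
    have hrest : ∀ r' ∈ rs, HISTORICAL_PODIUMS.contains r' = true ∧ (HISTORICAL_PODIUMS.getD r' []).length = 3 :=
      fun r' hr' => h r' (List.mem_cons_of_mem _ hr')
    simp only [List.foldl_cons, pvStepA, hc, if_true, hp, List.filter_cons]
    rw [ih hrest]
    simp [pvMatch, hp, PySem.List.pyGet?, PySem.List.pyGetD, PySem.List.pyIdx?]
    refine ⟨?_, ?_, ?_⟩ <;> split_ifs <;> simp <;> ring

-- A's window of rounds is the full 1..24 window restricted to rounds ≤ min(current_round, 24)
lemma range_window (cr : Int) :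
    PySem.List.pyRange 1 (min (cr + 1) 25) 1 =
      (PySem.List.pyRange 1 25 1).filter (fun r => decide (r ≤ min cr 24)) := by
  by_cases hlo : cr + 1 ≤ 1
  · rw [PySem.List.pyRange_one_eq_nil (by omega)]
    symm
    rw [List.filter_eq_nil_iff]
    intro r hr
    rw [PySem.List.mem_pyRange_one] at hr
    simp; omega
  · have h1 : (1 : Int) ≤ min (cr + 1) 25 := by omega
    have h2 : min (cr + 1) 25 ≤ 25 := by omega
    rw [PySem.List.pyRange_one_append 1 (min (cr + 1) 25) 25 h1 h2, List.filter_append]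
    rw [List.filter_eq_self.mpr, List.filter_eq_nil_iff.mpr, List.append_nil]
    · intro r hr
      rw [PySem.List.mem_pyRange_one] at hr
      simp; omega
    · intro r hr
      rw [PySem.List.mem_pyRange_one] at hr
      simp; omega

-- on an ascending list, the early-exit count is the number of elements ≤ cutoff
lemma countUpto_eq_filter (cutoff : Int) (l : List Int) (hs : l.Pairwise (· < ·)) :
    pvCountUpto l cutoff = ((l.filter (fun r => decide (r ≤ cutoff))).length : Int) := by
  induction l with
  | nil => simp [pvCountUpto]
  | cons r rs ih =>
    rw [List.pairwise_cons] at hs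
    by_cases h : r > cutoff
    · have : rs.filter (fun r => decide (r ≤ cutoff)) = [] := by
        rw [List.filter_eq_nil_iff]
        intro x hx
        have := hs.1 x hx
        simp; omega
      simp [pvCountUpto, h, this]
    · simp [pvCountUpto, h, ih hs.2, not_lt.mp h]

-- the inverted index at any surname holds exactly the per-column matching rounds of the full window
lemma index_spec (d : String) :
    pvPodiumIndex.getD d ([], [], []) =
      ((PySem.List.pyRange 1 25 1).filter (pvMatch 0 d),
       (PySem.List.pyRange 1 25 1).filter (pvMatch 1 d),
       (PySem.List.pyRange 1 25 1).filter (pvMatch 2 d)) := by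
  by_cases hmem : d ∈ pvNAMES
  · set_option maxRecDepth 40000 in fin_cases hmem <;> decide
  · have hkeys : pvPodiumIndex.keys = pvNAMES := by set_option maxRecDepth 40000 in decide
    have hcont : pvPodiumIndex.contains d = false := by
      rw [PySem.Dict.contains_eq_decide_mem_keys, hkeys]
      simpa using hmem
    rw [PySem.Dict.getD_of_not_contains _ _ hcont]
    have hnames : ∀ r ∈ PySem.List.pyRange 1 25 1,
        pvMatch 0 d r = false ∧ pvMatch 1 d r = false ∧ pvMatch 2 d r = false := by
      have hin : ∀ r ∈ PySem.List.pyRange 1 25 1,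
          PySem.List.pyGetD (HISTORICAL_PODIUMS.getD r []) 0 "" ∈ pvNAMES ∧
          PySem.List.pyGetD (HISTORICAL_PODIUMS.getD r []) 1 "" ∈ pvNAMES ∧
          PySem.List.pyGetD (HISTORICAL_PODIUMS.getD r []) 2 "" ∈ pvNAMES := by decide
      intro r hr
      obtain ⟨h0, h1, h2⟩ := hin r hr
      refine ⟨?_, ?_, ?_⟩ <;> simp only [pvMatch, beq_eq_false_iff_ne, ne_eq] <;>
        rintro rfl <;> [exact hmem h0; exact hmem h1; exact hmem h2]
    have e0 : (PySem.List.pyRange 1 25 1).filter (pvMatch 0 d) = [] :=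
      List.filter_eq_nil_iff.mpr (fun r hr => by simp [(hnames r hr).1])
    have e1 : (PySem.List.pyRange 1 25 1).filter (pvMatch 1 d) = [] :=
      List.filter_eq_nil_iff.mpr (fun r hr => by simp [(hnames r hr).2.1])
    have e2 : (PySem.List.pyRange 1 25 1).filter (pvMatch 2 d) = [] :=
      List.filter_eq_nil_iff.mpr (fun r hr => by simp [(hnames r hr).2.2])
    rw [e0, e1, e2]

-- ===== VERDICT (by name: the statement is the Claim_ definition above) =====
theorem calculate_podium_finishes_spec : Claim_equal_calculate_podium_finishes := by
  intro d cr _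
  unfold Spec_calculate_podium_finishes calculate_podium_finishes calculate_podium_finishes_alt
  have hpair : (PySem.List.pyRange 1 25 1).Pairwise (· < ·) := PySem.List.pairwise_lt_pyRange_one 1 25
  have hkeys : ∀ r ∈ PySem.List.pyRange 1 25 1,
      HISTORICAL_PODIUMS.contains r = true ∧ (HISTORICAL_PODIUMS.getD r []).length = 3 := by
    intro r hr
    rw [PySem.List.mem_pyRange_one] at hr
    exact podium_key r hr.1 (by omega)
  rw [range_window cr]
  rw [fold_eq_filters d _ (fun r hr => hkeys r (List.mem_filter.mp hr).1)]
  rw [index_spec d]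
  simp only [zero_add]
  have cnt : ∀ p : Int,
      pvCountUpto ((PySem.List.pyRange 1 25 1).filter (pvMatch p d)) (min cr 24) =
        ((((PySem.List.pyRange 1 25 1).filter (fun r => decide (r ≤ min cr 24))).filter (pvMatch p d)).length : Int) := by
    intro p
    rw [countUpto_eq_filter _ _ (List.Pairwise.sublist List.filter_sublist hpair)]
    rw [List.filter_comm]
  rw [cnt 0, cnt 1, cnt 2]
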